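-- pv_equiv track=rewrite | github.com/GNT-CodingTest/programmers | programmers_level1/Mock_test.py | solution
-- ===== SOURCE A (Python) =====
-- def solution(answers):
--     answer = []
--
--     one = [1, 2, 3, 4, 5]
--     two = [2, 1, 2, 3, 2, 4, 2, 5]
--     three = [3, 3, 1, 1, 2, 2, 4, 4, 5, 5]
--
--     cnt = {1: 0, 2: 0, 3: 0}
--
--     for i in range(len(answers)):
--         if answers[i] == one[i % len(one)]:
--             cnt[1] += 1
--         if answers[i] == two[i % len(two)]:
--             cnt[2] += 1
--         if answers[i] == three[i % len(three)]:
--             cnt[3] += 1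
--
--     for k, v in cnt.items():
--         if v == max(cnt.values()):
--             answer.append(k)
--
--     # for idx, s in enumerate(score):
--     #     if s == max(score):
--     #         result.append(idx + 1)
--
--     return answer
-- ===== SOURCE B (Python) =====
-- def solution(answers):
--     # Histogram approach: one pass builds counts keyed by (position mod 40, answer)
--     # (40 = lcm of the three pattern lengths), then each score is read off the
--     # histogram without rescanning the answers.
--     hist = {}
--     for i, a in enumerate(answers):
--         key = (i % 40, a)
--         hist[key] = hist.get(key, 0) + 1
--     patterns = [[1, 2, 3, 4, 5],
--                 [2, 1, 2, 3, 2, 4, 2, 5],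
--                 [3, 3, 1, 1, 2, 2, 4, 4, 5, 5]]
--     scores = [sum(hist.get((r, p[r % len(p)]), 0) for r in range(40))
--               for p in patterns]
--     highest = max(scores)
--     return [n + 1 for n, s in enumerate(scores) if s == highest]
-- ===== Notes on version B (the rewrite author's own statement) =====
-- stated objective: alternative
-- what changed: Instead of comparing every answer against each cyclic pattern, B builds in one pass a histogram keyed by (index mod 40, answer) -- 40 being the lcm of the pattern lengths -- and then reads each pattern's score out of the histogram as a sum of 40 lookups, so no per-pattern scan of the answers exists.
import Mathlib
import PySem

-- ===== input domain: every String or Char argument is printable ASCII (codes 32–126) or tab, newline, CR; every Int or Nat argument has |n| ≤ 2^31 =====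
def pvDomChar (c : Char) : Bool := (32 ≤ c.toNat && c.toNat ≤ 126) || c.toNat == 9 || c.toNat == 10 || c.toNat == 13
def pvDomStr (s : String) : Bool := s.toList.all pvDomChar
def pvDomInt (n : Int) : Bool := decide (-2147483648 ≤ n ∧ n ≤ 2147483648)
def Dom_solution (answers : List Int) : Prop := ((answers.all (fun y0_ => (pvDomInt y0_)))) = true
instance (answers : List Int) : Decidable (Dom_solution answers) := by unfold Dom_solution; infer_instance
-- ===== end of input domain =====

-- B replaces A's per-index comparison against the three cyclic patterns by a one-pass
-- histogram keyed by (index mod 40, answer) — 40 = lcm of the pattern lengths — from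
-- which each pattern's score is read off as 40 lookups (alternative algorithm, same cost).

-- ===== PORT A =====
-- indices i and i % len(pattern) are always in range, so pyGetD's default is never used
def solution (answers : List Int) : List Int :=
  let one : List Int := [1, 2, 3, 4, 5]
  let two : List Int := [2, 1, 2, 3, 2, 4, 2, 5]
  let three : List Int := [3, 3, 1, 1, 2, 2, 4, 4, 5, 5]
  let cnt : PySem.Dict Int Int :=
    (PySem.List.pyRange 0 (PySem.List.len answers) 1).foldl (fun cnt i =>
      let cnt := if PySem.List.pyGetD answers i 0 =
          PySem.List.pyGetD one (PySem.Int.mod i (PySem.List.len one)) 0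
        then cnt.modify 1 0 (· + 1) else cnt
      let cnt := if PySem.List.pyGetD answers i 0 =
          PySem.List.pyGetD two (PySem.Int.mod i (PySem.List.len two)) 0
        then cnt.modify 2 0 (· + 1) else cnt
      if PySem.List.pyGetD answers i 0 =
          PySem.List.pyGetD three (PySem.Int.mod i (PySem.List.len three)) 0
        then cnt.modify 3 0 (· + 1) else cnt)
      (PySem.Dict.ofList [(1, 0), (2, 0), (3, 0)])
  -- max(cnt.values()): cnt always has three values, so max? is some; getD 0 is never the default
  cnt.items.foldl (fun answer kv =>
    if kv.2 = (PySem.List.max? cnt.values (fun v => v)).getD 0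
    then answer ++ [kv.1] else answer) []

-- ===== PORT B =====
-- indices r % len(p) are always in range, so pyGetD's default is never used;
-- hist.get(key, 0) defaults exactly where Python's .get does
def solution_alt (answers : List Int) : List Int :=
  let hist : PySem.Dict (Int × Int) Int :=
    (PySem.List.enumerate answers 0).foldl (fun d ia =>
      let key : Int × Int := (PySem.Int.mod ia.1 40, ia.2)
      d.insert key (d.getD key 0 + 1)) PySem.Dict.empty
  let patterns : List (List Int) :=
    [[1, 2, 3, 4, 5], [2, 1, 2, 3, 2, 4, 2, 5], [3, 3, 1, 1, 2, 2, 4, 4, 5, 5]]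
  let scores : List Int := patterns.map (fun p =>
    ((PySem.List.pyRange 0 40 1).map (fun r =>
      hist.getD (r, PySem.List.pyGetD p (PySem.Int.mod r (PySem.List.len p)) 0) 0)).sum)
  let highest : Int := (PySem.List.max? scores (fun v => v)).getD 0
  (PySem.List.enumerate scores 0).foldl (fun answer ns =>
    if ns.2 = highest then answer ++ [ns.1 + 1] else answer) []

-- ===== PRECONDITION & SPEC =====
def Spec_solution (answers : List Int) (out : List Int) : Prop := out = solution_alt answers
instance (answers : List Int) (out : List Int) : Decidable (Spec_solution answers out) := by unfold Spec_solution; infer_instance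

-- ===== CLAIM (what is proved, stated in full; the proofs are below) =====
def Claim_equal_solution : Prop := ∀ (answers : List Int), Dom_solution answers → Spec_solution answers (solution answers)

-- ===== LEMMAS AND PROOFS =====

-- one step of A's loop on the literal three-key dict
lemma tri_step (c1 c2 c3 : Int → Prop) [DecidablePred c1] [DecidablePred c2] [DecidablePred c3]
    (i x y z : Int) :
    (let d := if c1 i then (PySem.Dict.mk [((1:Int), x), (2, y), (3, z)]).modify 1 0 (· + 1)
              else PySem.Dict.mk [((1:Int), x), (2, y), (3, z)]
     let d := if c2 i then d.modify 2 0 (· + 1) else d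
     if c3 i then d.modify 3 0 (· + 1) else d)
    = PySem.Dict.mk [(1, if c1 i then x + 1 else x),
                     (2, if c2 i then y + 1 else y),
                     (3, if c3 i then z + 1 else z)] := by
  dsimp only
  split_ifs <;> rfl

-- A's counting loop over any index list equals three independent counting folds
lemma tri_fold (c1 c2 c3 : Int → Prop) [DecidablePred c1] [DecidablePred c2] [DecidablePred c3] :
    ∀ (l : List Int) (x y z : Int),
    l.foldl (fun (d : PySem.Dict Int Int) (i : Int) =>
      let d := if c1 i then d.modify 1 0 (· + 1) else d
      let d := if c2 i then d.modify 2 0 (· + 1) else d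
      if c3 i then d.modify 3 0 (· + 1) else d)
      (PySem.Dict.mk [(1, x), (2, y), (3, z)])
    = PySem.Dict.mk [(1, l.foldl (fun a i => if c1 i then a + 1 else a) x),
                     (2, l.foldl (fun a i => if c2 i then a + 1 else a) y),
                     (3, l.foldl (fun a i => if c3 i then a + 1 else a) z)]
  | [], x, y, z => rfl
  | i :: l, x, y, z => by
      simp only [List.foldl_cons]
      rw [tri_step c1 c2 c3 i x y z]
      exact tri_fold c1 c2 c3 l _ _ _

-- a sum of indicator terms over a duplicate-free list containing a collapses to one term
lemma sum_delta (P : Int → Prop) [DecidablePred P] (a : Int) :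
    ∀ (R : List Int), R.Nodup → a ∈ R →
    (R.map (fun r => if a = r ∧ P r then (1:Int) else 0)).sum
      = if P a then 1 else 0
  | [], _, hm => absurd hm (List.not_mem_nil)
  | r :: R, hnd, hm => by
      simp only [List.map_cons, List.sum_cons]
      rcases List.mem_cons.mp hm with h | h
      · subst h
        have : (R.map (fun r => if a = r ∧ P r then (1:Int) else 0)).sum = 0 := by
          apply List.sum_eq_zero
          intro x hx
          rcases List.mem_map.mp hx with ⟨r', hr', hr'x⟩
          have : a ≠ r' := fun he => (List.nodup_cons.mp hnd).1 (he ▸ hr')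
          simp [← hr'x, this]
        rw [this]
        by_cases hP : P a <;> simp [hP]
      · have hne : a ≠ r := fun he => (List.nodup_cons.mp hnd).1 (he ▸ h)
        rw [sum_delta P a R (List.nodup_cons.mp hnd).2 h]
        simp [hne]

-- summing per-bucket counts over all buckets recovers the total count
lemma sum_countP (F : Int → Int) (G : Int → Int → Prop) [∀ i r, Decidable (G i r)]
    (R : List Int) (hnd : R.Nodup) :
    ∀ (l : List Int), (∀ i ∈ l, F i ∈ R) →
    (R.map (fun r => ((l.countP (fun i => decide (F i = r ∧ G i r)) : Nat) : Int))).sum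
      = ((l.countP (fun i => decide (G i (F i))) : Nat) : Int)
  | [], _ => by simp
  | i :: l, hF => by
      have ih := sum_countP F G R hnd l (fun j hj => hF j (List.mem_cons_of_mem _ hj))
      simp only [List.countP_cons]
      have hsplit : ∀ r : Int,
          (((l.countP (fun i => decide (F i = r ∧ G i r))
              + if decide (F i = r ∧ G i r) = true then 1 else 0 : Nat)) : Int)
          = ((l.countP (fun i => decide (F i = r ∧ G i r)) : Nat) : Int)
            + (if F i = r ∧ G i r then (1:Int) else 0) := by
        intro r; by_cases h : F i = r ∧ G i r <;> simp [h]
      simp only [hsplit]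
      rw [PySem.List.sum_map_add_int, ih,
          sum_delta (fun r => G i r) (F i) R hnd (hF i List.mem_cons_self)]
      by_cases h : G i (F i) <;> simp [h]

-- B's histogram sum for one pattern value function equals the direct match count
lemma hist_sum (answers : List Int) (p : List Int)
    (hlp : 0 < PySem.List.len p) (hdvd : PySem.List.len p ∣ 40) :
    ((PySem.List.pyRange 0 40 1).map (fun r =>
      ((PySem.List.enumerate answers 0).foldl (fun (d : PySem.Dict (Int × Int) Int) ia =>
          d.insert (PySem.Int.mod ia.1 40, ia.2)
            (d.getD (PySem.Int.mod ia.1 40, ia.2) 0 + 1)) PySem.Dict.empty).getD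
        (r, PySem.List.pyGetD p (PySem.Int.mod r (PySem.List.len p)) 0) 0)).sum
    = (((PySem.List.pyRange 0 (PySem.List.len answers) 1).countP
        (fun i => decide (PySem.List.pyGetD answers i 0
            = PySem.List.pyGetD p (PySem.Int.mod i (PySem.List.len p)) 0)) : Nat) : Int) := by
  -- the histogram fold is a fold over the mapped key list; its getD is a count
  have hkey : ∀ k : Int × Int,
      ((PySem.List.enumerate answers 0).foldl (fun (d : PySem.Dict (Int × Int) Int) ia =>
          d.insert (PySem.Int.mod ia.1 40, ia.2)
            (d.getD (PySem.Int.mod ia.1 40, ia.2) 0 + 1)) PySem.Dict.empty).getD k 0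
      = (((PySem.List.pyRange 0 (PySem.List.len answers) 1).countP
          (fun i => decide ((PySem.Int.mod i 40, PySem.List.pyGetD answers i 0) = k)) : Nat) : Int) := by
    intro k
    rw [show ((PySem.List.enumerate answers 0).foldl (fun (d : PySem.Dict (Int × Int) Int) ia =>
          d.insert (PySem.Int.mod ia.1 40, ia.2)
            (d.getD (PySem.Int.mod ia.1 40, ia.2) 0 + 1)) PySem.Dict.empty)
        = (((PySem.List.enumerate answers 0).map
            (fun ia => (PySem.Int.mod ia.1 40, ia.2))).foldl
            (fun (d : PySem.Dict (Int × Int) Int) x => d.insert x (d.getD x 0 + 1))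
            PySem.Dict.empty) from by rw [List.foldl_map]]
    rw [PySem.Dict.getD_foldl_insert_add_one]
    rw [PySem.List.enumerate_eq_map_pyRange answers (0 : Int)]
    simp only [List.map_map, PySem.Dict.getD_empty, zero_add, List.count_eq_countP,
      List.countP_map]
    congr 1
    apply List.countP_congr
    intro i _
    simp [Function.comp]
  simp only [hkey]
  simp only [Prod.mk.injEq]
  -- collapse Σ_r count(F i = r ∧ …) to a single count via sum_countP
  rw [sum_countP (fun i => PySem.Int.mod i 40)
      (fun i r => PySem.List.pyGetD answers i 0 = PySem.List.pyGetD p (PySem.Int.mod r (PySem.List.len p)) 0)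
      (PySem.List.pyRange 0 40 1) (by decide)
      _ (fun i _ => PySem.List.mem_pyRange_one.mpr
          ⟨PySem.Int.mod_nonneg i (by norm_num),
           PySem.Int.mod_lt i (by norm_num)⟩)]
  congr 1
  apply List.countP_congr
  intro i _
  have hmm : PySem.Int.mod (PySem.Int.mod i 40) (PySem.List.len p) = PySem.Int.mod i (PySem.List.len p) := by
    rw [PySem.Int.mod_eq_emod_of_pos (by norm_num : (0:Int) < 40),
        PySem.Int.mod_eq_emod_of_pos hlp, PySem.Int.mod_eq_emod_of_pos hlp]
    exact Int.emod_emod_of_dvd i hdvd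
  rw [hmm]

-- the two final selection loops agree on a three-element score list
lemma sel_eq (a b c m : Int) :
    ([((1:Int), a), (2, b), (3, c)]).foldl (fun answer kv =>
      if kv.2 = m then answer ++ [kv.1] else answer) []
    = (PySem.List.enumerate [a, b, c] 0).foldl (fun answer ns =>
      if ns.2 = m then answer ++ [ns.1 + 1] else answer) [] := by
  simp [PySem.List.enumerate]

-- ===== VERDICT (by name: the statement is the Claim_ definition above) =====
theorem solution_spec : Claim_equal_solution := by
  intro answers _
  unfold Spec_solution solution solution_alt
  simp only [List.map_cons, List.map_nil]
  simp only [show (PySem.Dict.ofList [((1:Int), (0:Int)), (2, 0), (3, 0)])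
        = PySem.Dict.mk [(1, 0), (2, 0), (3, 0)] from rfl]
  rw [tri_fold (fun i => PySem.List.pyGetD answers i 0 =
        PySem.List.pyGetD [1, 2, 3, 4, 5] (PySem.Int.mod i (PySem.List.len [(1:Int), 2, 3, 4, 5])) 0)
      (fun i => PySem.List.pyGetD answers i 0 =
        PySem.List.pyGetD [2, 1, 2, 3, 2, 4, 2, 5] (PySem.Int.mod i (PySem.List.len [(2:Int), 1, 2, 3, 2, 4, 2, 5])) 0)
      (fun i => PySem.List.pyGetD answers i 0 =
        PySem.List.pyGetD [3, 3, 1, 1, 2, 2, 4, 4, 5, 5] (PySem.Int.mod i (PySem.List.len [(3:Int), 3, 1, 1, 2, 2, 4, 4, 5, 5])) 0)]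
  simp only [hist_sum answers [1, 2, 3, 4, 5] (by decide) (by decide),
      hist_sum answers [2, 1, 2, 3, 2, 4, 2, 5] (by decide) (by decide),
      hist_sum answers [3, 3, 1, 1, 2, 2, 4, 4, 5, 5] (by decide) (by decide)]
  simp only [PySem.List.foldl_ite_add_one, zero_add]
  exact sel_eq _ _ _ _
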